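-- pv_equiv track=rewrite | github.com/flohlen/University | Informatik/EidI/Blatt7/aufgabe_3.py | verlaengere
-- ===== SOURCE A (Python) =====
-- def hat_schlaufe(buch, i):
--
-- 	if buch[i] == i:
-- 		return True
-- 	else:
-- 		return False
--
-- def laenge(buch, i):
-- 	l = 1
-- 	while not hat_schlaufe(buch,i):
-- 		l+=1
-- 		i = buch[i]
--
-- 	return l
--
-- def verlaengere(buch, i, j):
--
-- 	l = laenge(buch,i)
-- 	for pos in range(l):
-- 		if buch[i] == j:
-- 			return False
-- 		i = buch[i]
-- 		if pos == l-1: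
-- 			buch[i] = j
-- 	return True
-- ===== SOURCE B (Python) =====
-- def verlaengere(buch, i, j):
--     while True:
--         if buch[i] == j:
--             return False
--         if buch[i] == i:
--             buch[i] = j
--             return True
--         i = buch[i]
-- ===== Notes on version B (the rewrite author's own statement) =====
-- stated objective: simpler
-- what changed: Replaces the two-phase count-then-retraverse (laenge length pass plus a counted for-loop over range(l)) by one single while-loop that walks the chain once, deciding at each node whether to return False, append j, or step.
import Mathlib
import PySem

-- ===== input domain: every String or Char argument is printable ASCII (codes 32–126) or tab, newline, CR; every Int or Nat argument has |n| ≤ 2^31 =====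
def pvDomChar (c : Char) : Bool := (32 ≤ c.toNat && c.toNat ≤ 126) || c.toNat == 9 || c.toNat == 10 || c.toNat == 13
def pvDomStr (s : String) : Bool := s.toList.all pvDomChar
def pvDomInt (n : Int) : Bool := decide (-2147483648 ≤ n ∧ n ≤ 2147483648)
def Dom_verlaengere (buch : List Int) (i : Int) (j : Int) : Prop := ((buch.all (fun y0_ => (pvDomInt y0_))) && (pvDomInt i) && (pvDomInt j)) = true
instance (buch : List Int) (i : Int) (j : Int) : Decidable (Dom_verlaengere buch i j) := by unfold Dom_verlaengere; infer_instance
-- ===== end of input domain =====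

-- B merges A's two-phase count-then-retraverse into one single-pass while loop (objective: simpler).
-- A mutates buch[s] = j at the self-loop node before returning True; B performs the same mutation;
-- the equivalence proved here is about the RETURN value only.

-- ===== PORT A =====
-- laenge: l = 1; while not (buch[i] == i): l += 1; i = buch[i].  Fueled (fuel = |buch|+1 suffices
-- under Pre_); none = the Python raises IndexError or the fuel runs out (divergence).
def pvLaengeA (buch : List Int) : Nat → Int → Option Nat
  | 0, _ => none
  | fuel+1, i =>
    match PySem.List.pyGet? buch i with
    | none => none
    | some v => if v = i then some 1 else (pvLaengeA buch fuel v).map (· + 1)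

-- for pos in range(l): if buch[i]==j: return False; i = buch[i]  (the final buch[i] = j mutation
-- does not affect the return value; return-value equivalence only, see header)
def pvLoopA (buch : List Int) (j : Int) : Nat → Int → Bool
  | 0, _ => true
  | pos+1, i =>
    match PySem.List.pyGet? buch i with
    | none => false
    | some v => if v = j then false else pvLoopA buch j pos v

def verlaengere (buch : List Int) (i : Int) (j : Int) : Bool :=
  match pvLaengeA buch (buch.length + 1) i with
  | none => false
  | some l => pvLoopA buch j l i

-- ===== PORT B =====
-- while True: if buch[i]==j: return False; if buch[i]==i: buch[i]=j; return True; i = buch[i]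
def pvLoopB (buch : List Int) (j : Int) : Nat → Int → Bool
  | 0, _ => false
  | fuel+1, i =>
    match PySem.List.pyGet? buch i with
    | none => false
    | some v =>
      if v = j then false
      else if v = i then true
      else pvLoopB buch j fuel v

def verlaengere_alt (buch : List Int) (i : Int) (j : Int) : Bool :=
  pvLoopB buch j (buch.length + 1) i

-- ===== PRECONDITION & SPEC =====
-- one pointer step (identity where the index is out of range; Pre_ separately demands in-range)
def pvStep (buch : List Int) (x : Int) : Int := (PySem.List.pyGet? buch x).getD x

-- Pre_: the pointer chain from i stays in range and reaches a self-loop node within |buch| steps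
-- (otherwise Python raises IndexError or loops forever).
def Pre_verlaengere (buch : List Int) (i : Int) (_j : Int) : Prop :=
  ∃ k < buch.length + 1,
    (∀ m ≤ k, (PySem.List.pyGet? buch ((pvStep buch)^[m] i)).isSome) ∧
      pvStep buch ((pvStep buch)^[k] i) = (pvStep buch)^[k] i

instance (buch : List Int) (i : Int) (j : Int) : Decidable (Pre_verlaengere buch i j) := by
  unfold Pre_verlaengere; infer_instance

def pvWitness_verlaengere : List Int × Int × Int := ([1, 1, 0], 0, 2)

def Spec_verlaengere (buch : List Int) (i : Int) (j : Int) (out : Bool) : Prop := out = verlaengere_alt buch i j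
instance (buch : List Int) (i : Int) (j : Int) (out : Bool) : Decidable (Spec_verlaengere buch i j out) := by unfold Spec_verlaengere; infer_instance

-- ===== CLAIM (what is proved, stated in full; the proofs are below) =====
def Claim_equal_verlaengere : Prop := ∀ (buch : List Int) (i : Int) (j : Int), Dom_verlaengere buch i j → Pre_verlaengere buch i j → Spec_verlaengere buch i j (verlaengere buch i j)

-- ===== LEMMAS AND PROOFS =====

-- the k-th node of the pointer chain starting at i (none = an index error on the way)
def pvChain (buch : List Int) (i : Int) : Nat → Option Int
  | 0 => some i
  | k+1 =>
    match PySem.List.pyGet? buch i with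
    | none => none
    | some v => pvChain buch v k

-- as long as every lookup along the way succeeds, pvChain computes the iterate of pvStep
theorem pvChain_eq_iterate (buch : List Int) :
    ∀ (k : Nat) (i : Int), (∀ m < k, (PySem.List.pyGet? buch ((pvStep buch)^[m] i)).isSome) →
      pvChain buch i k = some ((pvStep buch)^[k] i) := by
  intro k
  induction k with
  | zero => intro i _; simp [pvChain]
  | succ k ih =>
    intro i h
    have h0 := h 0 (Nat.succ_pos k)
    cases hv : PySem.List.pyGet? buch i with
    | none => rw [Function.iterate_zero_apply, hv] at h0; simp at h0
    | some v =>
      have hstep : pvStep buch i = v := by simp [pvStep, hv]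
      simp only [pvChain, hv]
      rw [Function.iterate_succ_apply, hstep]
      exact ih v (fun m hm => by
        have := h (m+1) (by omega)
        rwa [Function.iterate_succ_apply, hstep] at this)

-- if the chain reaches a self-loop at step k, laenge succeeds given fuel > k
theorem pvLaengeA_isSome (buch : List Int) :
    ∀ (k : Nat) (i s : Int), pvChain buch i k = some s →
      PySem.List.pyGet? buch s = some s →
      ∀ fuel, k < fuel → (pvLaengeA buch fuel i).isSome := by
  intro k
  induction k with
  | zero =>
    intro i s hc hs fuel hf
    cases fuel with
    | zero => omega
    | succ f =>
      simp [pvChain] at hc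
      subst hc
      simp [pvLaengeA, hs]
  | succ k ih =>
    intro i s hc hs fuel hf
    cases fuel with
    | zero => omega
    | succ f =>
      simp only [pvChain] at hc
      cases hv : PySem.List.pyGet? buch i with
      | none => simp [hv] at hc
      | some v =>
        rw [hv] at hc
        simp only [pvLaengeA, hv]
        by_cases hvi : v = i
        · simp [hvi]
        · simp only [hvi, if_false]
          have := ih v s hc hs f (by omega)
          simpa using this

-- key lemma: whenever laenge returns some l, A's counted re-traversal equals B's one-pass walk
theorem pvLoopA_eq_pvLoopB (buch : List Int) (j : Int) :
    ∀ (fuel : Nat) (i : Int) (l : Nat), pvLaengeA buch fuel i = some l →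
      pvLoopA buch j l i = pvLoopB buch j fuel i := by
  intro fuel
  induction fuel with
  | zero => intro i l h; simp [pvLaengeA] at h
  | succ f ih =>
    intro i l h
    simp only [pvLaengeA] at h
    cases hv : PySem.List.pyGet? buch i with
    | none => rw [hv] at h; simp at h
    | some v =>
      rw [hv] at h
      by_cases hvi : v = i
      · simp only [hvi] at h
        have hl : l = 1 := by simpa using h.symm
        subst hl
        simp only [pvLoopA, pvLoopB, hv, hvi]
        by_cases hij : i = j
        · simp [hij]
        · simp [hij]
      · simp only [hvi, if_false, Option.map_eq_some_iff] at h
        obtain ⟨m, hm, hlm⟩ := h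
        subst hlm
        simp only [pvLoopA, pvLoopB, hv, hvi, if_false]
        by_cases hvj : v = j
        · simp [hvj]
        · simp only [hvj, if_false]
          exact ih v m hm

-- ===== VERDICT (by name: the statement is the Claim_ definition above) =====
theorem verlaengere_spec : Claim_equal_verlaengere := by
  intro buch i j _ hpre
  obtain ⟨k, hk, hsome, hfix⟩ := hpre
  unfold Spec_verlaengere verlaengere verlaengere_alt
  have hc : pvChain buch i k = some ((pvStep buch)^[k] i) :=
    pvChain_eq_iterate buch k i (fun m hm => hsome m (Nat.le_of_lt hm))
  have hs : PySem.List.pyGet? buch ((pvStep buch)^[k] i) = some ((pvStep buch)^[k] i) := by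
    have h1 := hsome k (Nat.le_refl k)
    cases hv : PySem.List.pyGet? buch ((pvStep buch)^[k] i) with
    | none => rw [hv] at h1; simp at h1
    | some v =>
      have : pvStep buch ((pvStep buch)^[k] i) = v := by simp [pvStep, hv]
      rw [← this, hfix]
  have hlsome := pvLaengeA_isSome buch k i ((pvStep buch)^[k] i) hc hs (buch.length + 1) hk
  cases hl : pvLaengeA buch (buch.length + 1) i with
  | none => rw [hl] at hlsome; simp at hlsome
  | some l => exact pvLoopA_eq_pvLoopB buch j (buch.length + 1) i l hl
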